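-- pv_equiv track=rewrite | github.com/epmoyer/cascade | web/cascade/util.py | list_to_range_tuples
-- ===== SOURCE A (Python) =====
-- def list_to_range_tuples(item_list):
--     '''Given a sorted list of numbers, return a list of range tuples spanning all numbers in the list
--     Group contiguous paragraph indices to create a list of tuples where each tuple
--     specifies a range of paragraphs to purge
--     Example: [100,99,98,70,49,48,47,29,28,2] --> [ (100,98), (70,70), (49,47), (29,28), (2,2) ]
--     '''
--     sorted_unique = sorted(list(set(item_list)), reverse=True)
--     ranges = []
--     range_in_progress = False
--     first = None
--     previous = None
--     for i in sorted_unique: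
--         if not range_in_progress:
--             first = i
--             previous = i
--             range_in_progress = True
--             continue
--         else:
--             if i == previous - 1:
--                 previous = i
--                 continue
--             else:
--                 # i is not in current range
--                 # Save previous range
--                 ranges.append((first, previous))
--                 # Begin a new range
--                 first = i
--                 previous = i
--     # Save the final range
--     ranges.append((first, previous))
--     return ranges
-- ===== SOURCE B (Python) =====
-- def list_to_range_tuples(item_list):
--     '''Given a list of numbers, return descending contiguous range tuples.
--     Scans the sorted-unique values in ascending order, merging each value
--     into the front of the output (back-to-front build); returns [] when empty.'''
--     su = sorted(set(item_list), reverse=True)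
--     out = []
--     for x in reversed(su):
--         if out and out[0][0] == x - 1:
--             out[0] = (x, out[0][1])
--         else:
--             out.insert(0, (x, x))
--     return out
-- ===== Notes on version B (the rewrite author's own statement) =====
-- stated objective: alternative
-- what changed: Replaces A's forward scan with range_in_progress/first/previous state and end-appends by a reverse (ascending) scan that merges each value into the run at the front of the output, so no flag or pending-range state exists and the empty case falls out naturally.
-- outside the precondition, e.g. on list_to_range_tuples([]): A returns [(None, None)], B returns []
import Mathlib
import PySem

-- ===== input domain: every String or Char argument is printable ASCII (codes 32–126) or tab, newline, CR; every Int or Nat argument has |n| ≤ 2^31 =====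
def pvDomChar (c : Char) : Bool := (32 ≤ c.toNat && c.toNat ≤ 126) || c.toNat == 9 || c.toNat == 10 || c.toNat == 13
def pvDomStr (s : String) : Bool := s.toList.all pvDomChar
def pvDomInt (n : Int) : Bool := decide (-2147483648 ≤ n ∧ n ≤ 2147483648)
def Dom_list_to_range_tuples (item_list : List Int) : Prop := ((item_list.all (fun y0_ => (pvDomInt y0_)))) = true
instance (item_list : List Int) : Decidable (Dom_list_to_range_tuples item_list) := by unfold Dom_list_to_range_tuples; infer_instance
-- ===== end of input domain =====

-- B replaces A's forward scan with flag/first/previous state by a reverse (ascending) scan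
-- that merges each value into the front of the output; objective: alternative decomposition.
-- Pre_ excludes the empty list, where A returns [(None, None)] — not a value of the declared type.


-- ===== PORT A =====
-- state = (ranges, range_in_progress, first, previous); Python's initial first/previous are
-- None, never read while range_in_progress is false, so they are carried as 0 here; the one
-- path that would read them unset (empty sorted_unique) is excluded by Pre_.
def list_to_range_tuples (item_list : List Int) : List (Int × Int) :=
  let sorted_unique := PySem.List.sorted (PySem.Set.ofList item_list) (fun x => x) true
  let st := sorted_unique.foldl
    (fun (st : List (Int × Int) × Bool × Int × Int) i =>
      let (ranges, range_in_progress, first, previous) := st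
      if range_in_progress = false then (ranges, true, i, i)
      else if i = previous - 1 then (ranges, true, first, i)
      else (ranges ++ [(first, previous)], true, i, i))
    ([], false, 0, 0)
  st.1 ++ [(st.2.2.1, st.2.2.2)]

-- ===== PORT B =====
-- 'for x in reversed(su)' with front-merge: foldl over su.reverse; out[0] is the run in progress.
def list_to_range_tuples_alt (item_list : List Int) : List (Int × Int) :=
  let su := PySem.List.sorted (PySem.Set.ofList item_list) (fun x => x) true
  su.reverse.foldl
    (fun (out : List (Int × Int)) x =>
      match out with
      | (hi, lo) :: rest => if hi = x - 1 then (x, lo) :: rest else (x, x) :: (hi, lo) :: rest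
      | [] => [(x, x)])
    []

-- ===== PRECONDITION & SPEC =====
-- Pre_ excludes the empty list, the only input on which A's final append emits (None, None),
-- which is not a pair of ints; B naturally returns [] there.
def Pre_list_to_range_tuples (item_list : List Int) : Prop := item_list.isEmpty = false
instance (item_list : List Int) : Decidable (Pre_list_to_range_tuples item_list) := by unfold Pre_list_to_range_tuples; infer_instance
def pvWitness_list_to_range_tuples : List Int := ([100, 99, 98, 70, 2])

def Spec_list_to_range_tuples (item_list : List Int) (out : List (Int × Int)) : Prop := out = list_to_range_tuples_alt item_list
instance (item_list : List Int) (out : List (Int × Int)) : Decidable (Spec_list_to_range_tuples item_list out) := by unfold Spec_list_to_range_tuples; infer_instance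

-- ===== CLAIM (what is proved, stated in full; the proofs are below) =====
def Claim_equal_list_to_range_tuples : Prop := ∀ (item_list : List Int), Dom_list_to_range_tuples item_list → Pre_list_to_range_tuples item_list → Spec_list_to_range_tuples item_list (list_to_range_tuples item_list)

-- ===== LEMMAS AND PROOFS =====

-- canonical forward grouping of the tail of the descending list
def pvGroups (first previous : Int) : List Int → List (Int × Int)
  | [] => [(first, previous)]
  | x :: xs => if x = previous - 1 then pvGroups first x xs else (first, previous) :: pvGroups x x xs

-- B's step function, named for the lemmas
def pvBStep (out : List (Int × Int)) (x : Int) : List (Int × Int) :=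
  match out with
  | (hi, lo) :: rest => if hi = x - 1 then (x, lo) :: rest else (x, x) :: (hi, lo) :: rest
  | [] => [(x, x)]

-- merging a pending run (f, p) onto the front of an already-built grouping
def pvMergeHead (f p : Int) : List (Int × Int) → List (Int × Int)
  | [] => [(f, p)]
  | (hi, lo) :: rest => if hi = p - 1 then (f, lo) :: rest else (f, p) :: (hi, lo) :: rest

lemma pvFoldr_bstep_nil_iff (t : List Int) : t.foldr (fun x out => pvBStep out x) [] = [] ↔ t = [] := by
  cases t with
  | nil => simp
  | cons x xs =>
    simp only [List.foldr_cons]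
    constructor
    · intro h
      exfalso
      cases hfs : List.foldr (fun x out => pvBStep out x) [] xs with
      | nil => rw [hfs] at h; simp [pvBStep] at h
      | cons p rest => rw [hfs] at h; obtain ⟨hi, lo⟩ := p; simp only [pvBStep] at h; split at h <;> simp at h
    · intro h; simp at h

lemma pvBStep_eq_mergeHead (l : List (Int × Int)) (x : Int) : pvBStep l x = pvMergeHead x x l := by
  cases l with
  | nil => rfl
  | cons q rest => obtain ⟨hi, lo⟩ := q; rfl

lemma pvGroups_eq_mergeHead (t : List Int) : ∀ (f p : Int),
    pvGroups f p t = pvMergeHead f p (t.foldr (fun x out => pvBStep out x) []) := by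
  induction t with
  | nil => intro f p; rfl
  | cons x xs ih =>
    intro f p
    simp only [List.foldr_cons]
    cases hfs : List.foldr (fun x out => pvBStep out x) [] xs with
    | nil =>
      have hxs : xs = [] := (pvFoldr_bstep_nil_iff xs).mp hfs
      subst hxs
      by_cases hx : x = p - 1 <;> simp [pvGroups, pvBStep, pvMergeHead, hx]
    | cons q rest =>
      obtain ⟨hi, lo⟩ := q
      simp only [pvGroups]
      by_cases hx : x = p - 1
      · rw [if_pos hx, ih f x, hfs]
        simp only [pvBStep, pvMergeHead]
        split_ifs <;> simp_all
      · rw [if_neg hx, ih x x, hfs]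
        simp only [pvBStep, pvMergeHead]
        split_ifs <;> simp_all

-- simpler: A's finalized result equals pvGroups
lemma pvFoldlA (t : List Int) : ∀ (ranges : List (Int × Int)) (f p : Int),
    (let st := t.foldl
      (fun (st : List (Int × Int) × Bool × Int × Int) i =>
        let (ranges, range_in_progress, first, previous) := st
        if range_in_progress = false then (ranges, true, i, i)
        else if i = previous - 1 then (ranges, true, first, i)
        else (ranges ++ [(first, previous)], true, i, i))
      (ranges, true, f, p)
     st.1 ++ [(st.2.2.1, st.2.2.2)]) = ranges ++ pvGroups f p t := by
  induction t with
  | nil => intro ranges f p; simp [pvGroups]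
  | cons x xs ih =>
    intro ranges f p
    simp only [List.foldl_cons]
    by_cases hx : x = p - 1
    · simpa [hx, pvGroups] using ih ranges f x
    · simp only [if_neg hx, pvGroups]
      simpa [hx, pvGroups] using ih (ranges ++ [(f, p)]) x x

-- ===== VERDICT (by name: the statement is the Claim_ definition above) =====
lemma pvSet_ofList_ne_nil {l : List Int} (h : l ≠ []) : PySem.Set.ofList l ≠ [] := by
  cases l with
  | nil => exact absurd rfl h
  | cons y ys =>
    intro hnil
    have : y ∈ PySem.Set.ofList (y :: ys) := (PySem.Set.mem_ofList _ _).mpr (List.mem_cons_self)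
    rw [hnil] at this
    exact absurd this (List.not_mem_nil)

theorem list_to_range_tuples_spec : Claim_equal_list_to_range_tuples := by
  intro l _ hpre
  unfold Spec_list_to_range_tuples list_to_range_tuples list_to_range_tuples_alt
  have hne : PySem.List.sorted (PySem.Set.ofList l) (fun x => x) true ≠ [] := by
    intro h
    have : l ≠ [] := by
      intro hl; rw [hl] at hpre; simp [Pre_list_to_range_tuples] at hpre
    exact pvSet_ofList_ne_nil this ((PySem.List.sorted_eq_nil_iff _ _ _).mp h)
  obtain ⟨h, t, hsu⟩ := List.exists_cons_of_ne_nil hne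
  rw [hsu]
  have hfun : (fun (out : List (Int × Int)) (x : Int) =>
      match out with
      | (hi, lo) :: rest => if hi = x - 1 then (x, lo) :: rest else (x, x) :: (hi, lo) :: rest
      | [] => [(x, x)]) = fun out x => pvBStep out x := by
    funext out x
    cases out with
    | nil => rfl
    | cons q rest => obtain ⟨hi, lo⟩ := q; rfl
  rw [hfun, List.foldl_reverse, List.foldr_cons, pvBStep_eq_mergeHead, ← pvGroups_eq_mergeHead]
  simp only [List.foldl_cons]
  simpa using pvFoldlA t [] h h
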